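-- pv_equiv track=rewrite | github.com/Aliyousef99/medibot_ready | lab_parser.py | html_unescape
-- ===== SOURCE A (Python) =====
-- def html_unescape(s: str) -> str:
--     # Minimal replacements as requested
--     repl = {
--         "&lt;=": "<=",
--         "&gt;=": ">=",
--         "&le;": "<=",
--         "&ge;": ">=",
--         "&lt;": "<",
--         "&gt;": ">",
--         "&nbsp;": " ",
--     }
--     for k, v in repl.items():
--         s = s.replace(k, v)
--     return s
-- ===== SOURCE B (Python) =====
-- import re
--
-- _REPL = {
--     "&lt;=": "<=",
--     "&gt;=": ">=",
--     "&le;": "<=",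
--     "&ge;": ">=",
--     "&lt;": "<",
--     "&gt;": ">",
--     "&nbsp;": " ",
-- }
-- _PAT = re.compile("&lt;=|&gt;=|&le;|&ge;|&lt;|&gt;|&nbsp;")
--
-- def html_unescape(s: str) -> str:
--     # single left-to-right pass: each matched entity is looked up once
--     return _PAT.sub(lambda m: _REPL[m.group(0)], s)
-- ===== Notes on version B (the rewrite author's own statement) =====
-- stated objective: idiomatic
-- what changed: Replaces the seven sequential full-string str.replace passes with one compiled regex alternation (prefix entities first) that scans the string once and maps each matched entity through the table.
import Mathlib
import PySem

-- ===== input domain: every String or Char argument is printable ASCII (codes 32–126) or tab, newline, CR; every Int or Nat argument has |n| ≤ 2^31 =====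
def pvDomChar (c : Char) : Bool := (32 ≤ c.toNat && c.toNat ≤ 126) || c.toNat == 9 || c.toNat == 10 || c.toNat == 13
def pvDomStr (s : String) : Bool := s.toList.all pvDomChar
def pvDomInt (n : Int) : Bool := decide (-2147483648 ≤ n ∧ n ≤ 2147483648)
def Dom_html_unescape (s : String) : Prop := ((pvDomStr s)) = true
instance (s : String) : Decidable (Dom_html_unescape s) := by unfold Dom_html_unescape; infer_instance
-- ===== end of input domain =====

-- B replaces A's seven sequential full-string replace passes with a single left-to-right scan
-- (a regex alternation in Python) dispatching each matched entity through the table once.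

-- ===== PORT A =====
-- the dict literal `repl` in insertion order; the loop `for k, v in repl.items(): s = s.replace(k, v)` is a foldl
def html_unescape (s : String) : String :=
  let repl : List (String × String) :=
    [("&lt;=", "<="), ("&gt;=", ">="), ("&le;", "<="), ("&ge;", ">="),
     ("&lt;", "<"), ("&gt;", ">"), ("&nbsp;", " ")]
  repl.foldl (fun s kv => PySem.Str.replace s kv.1 kv.2) s

-- ===== PORT B =====
-- the alternation "&lt;=|&gt;=|&le;|&ge;|&lt;|&gt;|&nbsp;" of Source B, tried left to right at each position
def pvTable : List (List Char × List Char) :=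
  [ (['&','l','t',';','='], ['<','=']),
    (['&','g','t',';','='], ['>','=']),
    (['&','l','e',';'],     ['<','=']),
    (['&','g','e',';'],     ['>','=']),
    (['&','l','t',';'],     ['<']),
    (['&','g','t',';'],     ['>']),
    (['&','n','b','s','p',';'], [' ']) ]

-- first alternative matching at the front of l: returns (its replacement, the rest after the match)
def pvTryKeys : List (List Char × List Char) → List Char → Option (List Char × List Char)
  | [], _ => none
  | (k, v) :: rest, l => if k.isPrefixOf l then some (v, l.drop k.length) else pvTryKeys rest l

theorem pvTryKeys_lt (tab : List (List Char × List Char)) (h : ∀ kv ∈ tab, kv.1 ≠ [])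
    (l v r : List Char) (heq : pvTryKeys tab l = some (v, r)) : r.length < l.length := by
  induction tab with
  | nil => simp [pvTryKeys] at heq
  | cons kv rest ih =>
    obtain ⟨k, v'⟩ := kv
    by_cases hp : k.isPrefixOf l
    · simp only [pvTryKeys, hp, if_true] at heq
      obtain ⟨rfl, rfl⟩ := Prod.mk.injEq .. ▸ Option.some.inj heq
      have hk : k ≠ [] := h (k, v') (by simp)
      have hle : k.length ≤ l.length :=
        (List.isPrefixOf_iff_prefix.mp hp).length_le
      have : 0 < k.length := List.length_pos_iff.mpr hk
      simp only [List.length_drop]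
      omega
    · simp only [pvTryKeys, hp] at heq
      exact ih (fun kv hkv => h kv (List.mem_cons_of_mem _ hkv)) heq

-- the single regex-sub pass: copy chars until an alternative matches, emit its replacement, continue after it
def pvScan : List Char → List Char
  | [] => []
  | c :: t =>
    match h : pvTryKeys pvTable (c :: t) with
    | some (v, r) => v ++ pvScan r
    | none => c :: pvScan t
termination_by l => l.length
decreasing_by
  · exact pvTryKeys_lt pvTable (by simp [pvTable]) _ _ _ h
  · simp

def html_unescape_alt (s : String) : String := String.ofList (pvScan s.toList)

-- ===== PRECONDITION & SPEC =====
def Spec_html_unescape (s : String) (out : String) : Prop := out = html_unescape_alt s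
instance (s : String) (out : String) : Decidable (Spec_html_unescape s out) := by unfold Spec_html_unescape; infer_instance

-- ===== CLAIM (what is proved, stated in full; the proofs are below) =====
def Claim_equal_html_unescape : Prop := ∀ (s : String), Dom_html_unescape s → Spec_html_unescape s (html_unescape s)

-- ===== LEMMAS AND PROOFS =====

-- structural reformulation of PySem.Chars.replace (Python's s.replace(old, new)) for nonempty old
def pvRep (old new : List Char) : List Char → List Char
  | [] => []
  | c :: t =>
    if h : old.isPrefixOf (c :: t) = true ∧ old ≠ [] then
      new ++ pvRep old new ((c :: t).drop old.length)
    else c :: pvRep old new t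
termination_by l => l.length
decreasing_by
  · have hle : old.length ≤ (c :: t).length := (List.isPrefixOf_iff_prefix.mp h.1).length_le
    have : 0 < old.length := List.length_pos_iff.mpr h.2
    simp only [List.length_drop]
    simp at hle ⊢
    omega
  · simp

theorem pvRep_go (old new : List Char) (hold : old ≠ []) :
    ∀ (fuel : Nat) (l acc : List Char), l.length ≤ fuel →
      PySem.Chars.replace.go old new fuel l acc = acc.reverse ++ pvRep old new l := by
  intro fuel
  induction fuel with
  | zero =>
    intro l acc hl
    have : l = [] := List.length_eq_zero_iff.mp (Nat.le_zero.mp hl)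
    subst this
    simp [PySem.Chars.replace.go, pvRep]
  | succ fuel ih =>
    intro l acc hl
    match l with
    | [] => simp [PySem.Chars.replace.go, pvRep]
    | c :: t =>
      by_cases hp : old.isPrefixOf (c :: t)
      · have hle : old.length ≤ (c :: t).length := (List.isPrefixOf_iff_prefix.mp hp).length_le
        have hpos : 0 < old.length := List.length_pos_iff.mpr hold
        have hdrop : ((c :: t).drop old.length).length ≤ fuel := by
          simp only [List.length_drop, List.length_cons] at *
          omega
        simp only [PySem.Chars.replace.go, hp, if_true]
        rw [ih _ _ hdrop]
        rw [pvRep]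
        simp [hp, hold]
      · simp only [PySem.Chars.replace.go, hp]
        have ht : t.length ≤ fuel := by simp at hl; omega
        rw [ih _ _ ht]
        rw [pvRep]
        simp [hp]

theorem replace_eq_pvRep (l old new : List Char) (hold : old ≠ []) :
    PySem.Chars.replace l old new = pvRep old new l := by
  rw [PySem.Chars.replace]
  simp only [List.isEmpty_eq_false_iff.mpr hold] -- old nonempty
  have := pvRep_go old new hold l.length l [] (le_refl _)
  simpa using this

theorem pvRep_nil (old new : List Char) : pvRep old new [] = [] := by rw [pvRep]

theorem pvRep_cons_of_not_prefix (old new : List Char) (c : Char) (t : List Char)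
    (h : ¬ old <+: (c :: t)) : pvRep old new (c :: t) = c :: pvRep old new t := by
  rw [pvRep]
  simp [List.isPrefixOf_iff_prefix, h]

theorem pvRep_of_prefix (old new r : List Char) (hold : old ≠ []) :
    pvRep old new (old ++ r) = new ++ pvRep old new r := by
  obtain ⟨o, old', rfl⟩ : ∃ a b, old = a :: b := by
    cases old with
    | nil => exact absurd rfl hold
    | cons a b => exact ⟨a, b, rfl⟩
  rw [show (o :: old') ++ r = o :: (old' ++ r) by simp, pvRep]
  have hp : (o :: old').isPrefixOf (o :: (old' ++ r)) = true := by
    rw [List.isPrefixOf_iff_prefix]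
    exact ⟨r, by simp⟩
  simp only [hp, ne_eq, reduceCtorEq, not_false_eq_true, and_self, reduceDIte]
  congr 1
  congr 1
  rw [show o :: (old' ++ r) = (o :: old') ++ r by simp, List.drop_left]

-- an '&'-headed pattern never matches inside an '&'-free block: the block passes through untouched
theorem pvRep_append_noAmp (old new : List Char) (hh : old.head? = some '&') :
    ∀ (u t : List Char), (∀ c ∈ u, c ≠ '&') →
      pvRep old new (u ++ t) = u ++ pvRep old new t := by
  intro u
  induction u with
  | nil => simp
  | cons c u' ih =>
    intro t hu
    have hc : c ≠ '&' := hu c (by simp)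
    have hnp : ¬ old <+: (c :: (u' ++ t)) := by
      intro hp
      cases old with
      | nil => simp at hh
      | cons o old' =>
        have ho : o = '&' := by simpa using hh
        have hoc : o = c := (List.cons_prefix_cons.mp hp).1
        subst hoc
        exact hc ho
    rw [show (c :: u') ++ t = c :: (u' ++ t) by simp, pvRep_cons_of_not_prefix _ _ _ _ hnp,
        ih t (fun d hd => hu d (by simp [hd]))]
    simp

-- properties every table entry enjoys: key starts with '&', key tail avoids {&,<,>,space},
-- value is '&'-free and starts with '<', '>' or ' '
abbrev pvGood (kv : List Char × List Char) : Prop :=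
  kv.1.head? = some '&' ∧
  (∀ c ∈ kv.1.tail, c ≠ '&' ∧ c ≠ '<' ∧ c ≠ '>' ∧ c ≠ ' ') ∧
  (∀ c ∈ kv.2, c ≠ '&') ∧
  kv.2 ≠ [] ∧ (kv.2.headI = '<' ∨ kv.2.headI = '>' ∨ kv.2.headI = ' ')

theorem pvTable_good : ∀ kv ∈ pvTable, pvGood kv := by
  intro kv hkv
  simp only [pvTable, List.mem_cons, List.not_mem_nil, or_false] at hkv
  rcases hkv with rfl | rfl | rfl | rfl | rfl | rfl | rfl <;>
    exact ⟨rfl, by simp, by simp, by simp, by simp⟩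

-- a replacement pass never creates a prefix made of {&,<,>,space}-free characters
theorem pvRep_prefix_reflect (old new : List Char) (hg : pvGood (old, new)) :
    ∀ (t w : List Char), (∀ c ∈ w, c ≠ '&' ∧ c ≠ '<' ∧ c ≠ '>' ∧ c ≠ ' ') →
      w <+: pvRep old new t → w <+: t := by
  obtain ⟨hh0, _, _, hvne0, hd0⟩ := hg
  have hh : old.head? = some '&' := hh0
  have hvne : new ≠ [] := hvne0
  have hd : new.headI = '<' ∨ new.headI = '>' ∨ new.headI = ' ' := hd0
  obtain ⟨d, v', rfl⟩ : ∃ a b, new = a :: b := by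
    cases new with
    | nil => exact absurd rfl hvne
    | cons a b => exact ⟨a, b, rfl⟩
  simp only [List.headI] at hd
  intro t
  induction t with
  | nil => intro w hw hp; rw [pvRep_nil] at hp; simpa using hp
  | cons c t' ih =>
    intro w hw hp
    by_cases hpre : old <+: (c :: t')
    · -- the pass replaced at the front: the new head is in {<,>,space}, so w must be empty
      obtain ⟨r, hr⟩ := hpre
      have heq : c :: t' = old ++ r := hr.symm
      rw [heq, pvRep_of_prefix old (d :: v') r (by rintro rfl; simp at hh)] at hp
      cases w with
      | nil => exact List.nil_prefix
      | cons e w' =>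
        exfalso
        have he : e = d := (List.cons_prefix_cons.mp (by simpa using hp)).1
        have hef := hw e (by simp)
        rcases hd with h | h | h <;> rw [← h] at hef <;> simp [he] at hef
    · rw [pvRep_cons_of_not_prefix _ _ _ _ hpre] at hp
      cases w with
      | nil => exact List.nil_prefix
      | cons e w' =>
        obtain ⟨h1, h2⟩ := List.cons_prefix_cons.mp hp
        subst h1
        exact List.cons_prefix_cons.mpr ⟨rfl, ih w' (fun x hx => hw x (by simp [hx])) h2⟩

-- A's pass sequence as a fold on the character level
def pvFold (tab : List (List Char × List Char)) (l : List Char) : List Char :=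
  tab.foldl (fun l kv => pvRep kv.1 kv.2 l) l

theorem pvFold_nil (tab : List (List Char × List Char)) (hg : ∀ kv ∈ tab, pvGood kv) :
    pvFold tab [] = [] := by
  induction tab with
  | nil => rfl
  | cons kv rest ih =>
    have := hg kv (by simp)
    rw [pvFold, List.foldl_cons, pvRep_nil]
    exact ih (fun kv hkv => hg kv (List.mem_cons_of_mem _ hkv))

theorem pvFold_append_noAmp (tab : List (List Char × List Char)) (hg : ∀ kv ∈ tab, pvGood kv)
    (u : List Char) (hu : ∀ c ∈ u, c ≠ '&') :
    ∀ t, pvFold tab (u ++ t) = u ++ pvFold tab t := by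
  induction tab with
  | nil => intro t; rfl
  | cons kv rest ih =>
    intro t
    have hgkv := hg kv (by simp)
    rw [pvFold, List.foldl_cons, pvRep_append_noAmp kv.1 kv.2 hgkv.1 u t hu]
    exact ih (fun kv hkv => hg kv (List.mem_cons_of_mem _ hkv)) _

-- if no earlier alternative matches at the front, the block k (an '&'-headed key, or a single char)
-- passes through a whole sequence of earlier passes untouched
theorem pvFold_keyBlock (pre : List (List Char × List Char)) (hg : ∀ kv ∈ pre, pvGood kv)
    (k : List Char) (hk : k.head? = some '&')
    (hkt : ∀ c ∈ k.tail, c ≠ '&' ∧ c ≠ '<' ∧ c ≠ '>' ∧ c ≠ ' ') :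
    ∀ r, (∀ kv ∈ pre, ¬ kv.1 <+: k ++ r) → pvFold pre (k ++ r) = k ++ pvFold pre r := by
  obtain ⟨k0, k'', rfl⟩ : ∃ a b, k = a :: b := by
    cases k with
    | nil => simp at hk
    | cons a b => exact ⟨a, b, rfl⟩
  have hk0 : k0 = '&' := by simpa using hk
  subst hk0
  induction pre with
  | nil => intro r _; rfl
  | cons p rest ih =>
    intro r hpre
    have hgp := hg p (by simp)
    have hstep : pvRep p.1 p.2 (('&' :: k'') ++ r) = ('&' :: k'') ++ pvRep p.1 p.2 r := by
      have hnp : ¬ p.1 <+: ('&' :: (k'' ++ r)) := by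
        intro h; exact hpre p (by simp) (by simpa using h)
      rw [show ('&' :: k'') ++ r = '&' :: (k'' ++ r) by simp,
          pvRep_cons_of_not_prefix _ _ _ _ hnp,
          pvRep_append_noAmp p.1 p.2 hgp.1 k'' r (fun c hc => (hkt c (by simpa using hc)).1)]
      simp
    rw [pvFold, List.foldl_cons, hstep]
    refine ih (fun kv hkv => hg kv (List.mem_cons_of_mem _ hkv)) (pvRep p.1 p.2 r) ?_
    -- earlier alternatives still do not match: either they are short (decided within k),
    -- or they extend k by forbidden-free chars, which the pass cannot have created
    intro kv hkv hp
    have hgkv := hg kv (List.mem_cons_of_mem _ hkv)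
    by_cases hlen : kv.1.length ≤ ('&' :: k'').length
    · have : kv.1 <+: ('&' :: k'') :=
        List.prefix_of_prefix_length_le hp (List.prefix_append _ _) hlen
      exact hpre kv (List.mem_cons_of_mem _ hkv) (this.trans (List.prefix_append _ r))
    · push_neg at hlen
      have hkv1 : ('&' :: k'') <+: kv.1 :=
        List.prefix_of_prefix_length_le (List.prefix_append _ _) hp (by omega)
      obtain ⟨w, hw⟩ := hkv1
      have hwne : w ≠ [] := by
        rintro rfl; rw [← hw] at hlen; simp at hlen
      -- w consists of forbidden-free chars (it lies inside kv.1's tail)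
      have hwchars : ∀ c ∈ w, c ≠ '&' ∧ c ≠ '<' ∧ c ≠ '>' ∧ c ≠ ' ' := by
        intro c hc
        refine hgkv.2.1 c ?_
        rw [← hw]
        simp [hc]
      have hwp : w <+: pvRep p.1 p.2 r := by
        rw [← hw] at hp
        rw [show (('&' :: k'') ++ w) <+: ('&' :: k'') ++ pvRep p.1 p.2 r ↔ w <+: pvRep p.1 p.2 r from
          List.prefix_append_right_inj _] at hp
        exact hp
      have : w <+: r := pvRep_prefix_reflect p.1 p.2 hgp r w hwchars hwp
      refine hpre kv (List.mem_cons_of_mem _ hkv) ?_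
      rw [← hw]
      exact (List.prefix_append_right_inj _).mpr this

-- splitting the pass sequence at the first matching alternative
theorem pvFold_split (pre post : List (List Char × List Char)) (k v : List Char)
    (hg : ∀ kv ∈ pre ++ (k, v) :: post, pvGood kv)
    (r : List Char) (hpre : ∀ kv ∈ pre, ¬ kv.1 <+: k ++ r) :
    pvFold (pre ++ (k, v) :: post) (k ++ r) = v ++ pvFold (pre ++ (k, v) :: post) r := by
  have hgk : pvGood (k, v) := hg (k, v) (by simp)
  have hgpre : ∀ kv ∈ pre, pvGood kv := fun kv hkv => hg kv (by simp [hkv])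
  have hgpost : ∀ kv ∈ post, pvGood kv := fun kv hkv => hg kv (by simp [hkv])
  have hkne : k ≠ [] := by rintro rfl; have := hgk.1; simp at this
  have hfa : ∀ x, pvFold (pre ++ (k, v) :: post) x = pvFold post (pvRep k v (pvFold pre x)) := by
    intro x; rw [pvFold, List.foldl_append, List.foldl_cons]; rfl
  rw [hfa, hfa]
  rw [pvFold_keyBlock pre hgpre k hgk.1 (by simpa using hgk.2.1) r hpre]
  rw [pvRep_of_prefix k v (pvFold pre r) hkne]
  exact pvFold_append_noAmp post hgpost v hgk.2.2.1 _

-- reading off pvTryKeys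
theorem pvTryKeys_none (tab : List (List Char × List Char)) (l : List Char)
    (h : pvTryKeys tab l = none) : ∀ kv ∈ tab, ¬ kv.1 <+: l := by
  induction tab with
  | nil => simp
  | cons kv rest ih =>
    obtain ⟨k, v⟩ := kv
    by_cases hp : k.isPrefixOf l
    · simp [pvTryKeys, hp] at h
    · simp only [pvTryKeys, hp] at h
      intro kv' hkv'
      rcases List.mem_cons.mp hkv' with rfl | hmem
      · simpa [List.isPrefixOf_iff_prefix] using hp
      · exact ih h kv' hmem

theorem pvTryKeys_some (tab : List (List Char × List Char)) (l v r : List Char)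
    (h : pvTryKeys tab l = some (v, r)) :
    ∃ pre k post, tab = pre ++ (k, v) :: post ∧ k <+: l ∧ r = l.drop k.length ∧
      ∀ kv ∈ pre, ¬ kv.1 <+: l := by
  induction tab with
  | nil => simp [pvTryKeys] at h
  | cons kv rest ih =>
    obtain ⟨k', v'⟩ := kv
    by_cases hp : k'.isPrefixOf l
    · simp only [pvTryKeys, hp, if_true] at h
      obtain ⟨rfl, rfl⟩ := Prod.mk.injEq .. ▸ Option.some.inj h
      exact ⟨[], k', rest, by simp, List.isPrefixOf_iff_prefix.mp hp, rfl, by simp⟩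
    · simp only [pvTryKeys, hp] at h
      obtain ⟨pre, k, post, htab, hkp, hr, hpre⟩ := ih h
      refine ⟨(k', v') :: pre, k, post, by simp [htab], hkp, hr, ?_⟩
      intro kv hkv
      rcases List.mem_cons.mp hkv with rfl | hmem
      · simpa [List.isPrefixOf_iff_prefix] using hp
      · exact hpre kv hmem

-- unfolding pvScan
theorem pvScan_match (l v r : List Char) (hl : l ≠ [])
    (h : pvTryKeys pvTable l = some (v, r)) : pvScan l = v ++ pvScan r := by
  cases l with
  | nil => exact absurd rfl hl
  | cons c t => rw [pvScan]; split <;> simp_all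

theorem pvScan_nomatch (c : Char) (t : List Char)
    (h : pvTryKeys pvTable (c :: t) = none) : pvScan (c :: t) = c :: pvScan t := by
  rw [pvScan]; split <;> simp_all

-- main equivalence on the character level: the seven passes equal the single scan
theorem pvFold_eq_pvScan : ∀ (n : Nat) (l : List Char), l.length ≤ n →
    pvFold pvTable l = pvScan l := by
  intro n
  induction n with
  | zero =>
    intro l hl
    have : l = [] := List.length_eq_zero_iff.mp (Nat.le_zero.mp hl)
    subst this
    rw [pvFold_nil pvTable pvTable_good, pvScan]
  | succ n ih =>
    intro l hl
    match heq : pvTryKeys pvTable l with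
    | some (v, r) =>
      obtain ⟨pre, k, post, htab, hkp, hr, hpre⟩ := pvTryKeys_some pvTable l v r heq
      obtain ⟨r', rfl⟩ := hkp
      have hkne : k ≠ [] := by
        rintro rfl
        have hbad := pvTable_good ([], v) (by rw [htab]; simp)
        have := hbad.1; simp at this
      have hrr : r = r' := by rw [hr, List.drop_left]
      subst hrr
      have hrlen : r.length ≤ n := by
        have := pvTryKeys_lt pvTable (fun kv hkv => by
          have hgood := pvTable_good kv hkv
          rintro hnil
          have h1 := hgood.1
          rw [hnil] at h1
          simp at h1) _ _ _ heq
        omega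
      rw [pvScan_match _ v r (by simp [hkne]) heq]
      rw [htab, pvFold_split pre post k v (fun kv hkv => pvTable_good kv (by rw [htab]; exact hkv)) r (fun kv hkv => hpre kv hkv)]
      rw [← htab, ih r hrlen]
    | none =>
      match l with
      | [] => rw [pvFold_nil pvTable pvTable_good, pvScan]
      | c :: t =>
        have hno := pvTryKeys_none pvTable (c :: t) heq
        have htlen : t.length ≤ n := by simp at hl; omega
        rw [pvScan_nomatch c t heq, ← ih t htlen]
        by_cases hc : c = '&'
        · subst hc
          exact pvFold_keyBlock pvTable pvTable_good ['&'] rfl (by simp) t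
            (fun kv hkv => by simpa using hno kv hkv)
        · exact pvFold_append_noAmp pvTable pvTable_good [c] (by simpa using hc) t

-- bridging A's String-level fold to the character-level fold
theorem html_unescape_toList (s : String) :
    (html_unescape s).toList = pvFold pvTable s.toList := by
  have h1 : "&lt;=".toList = ['&','l','t',';','='] := by decide
  have h2 : "&gt;=".toList = ['&','g','t',';','='] := by decide
  have h3 : "&le;".toList = ['&','l','e',';'] := by decide
  have h4 : "&ge;".toList = ['&','g','e',';'] := by decide
  have h5 : "&lt;".toList = ['&','l','t',';'] := by decide
  have h6 : "&gt;".toList = ['&','g','t',';'] := by decide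
  have h7 : "&nbsp;".toList = ['&','n','b','s','p',';'] := by decide
  have hv1 : "<=".toList = ['<','='] := by decide
  have hv2 : ">=".toList = ['>','='] := by decide
  have hv3 : "<".toList = ['<'] := by decide
  have hv4 : ">".toList = ['>'] := by decide
  have hv5 : " ".toList = [' '] := by decide
  simp only [html_unescape, List.foldl_cons, List.foldl_nil, PySem.Str.toList_replace,
    h1, h2, h3, h4, h5, h6, h7, hv1, hv2, hv3, hv4, hv5]
  rw [replace_eq_pvRep _ _ _ (by decide), replace_eq_pvRep _ _ _ (by decide),
      replace_eq_pvRep _ _ _ (by decide), replace_eq_pvRep _ _ _ (by decide),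
      replace_eq_pvRep _ _ _ (by decide), replace_eq_pvRep _ _ _ (by decide),
      replace_eq_pvRep _ _ _ (by decide)]
  rfl

-- ===== VERDICT (by name: the statement is the Claim_ definition above) =====
theorem html_unescape_spec : Claim_equal_html_unescape := by
  intro s _
  unfold Spec_html_unescape html_unescape_alt
  apply String.toList_inj.mp
  rw [html_unescape_toList, pvFold_eq_pvScan s.toList.length s.toList (le_refl _)]
  simp
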